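-- pv_equiv track=rewrite | github.com/krivers/ITAP-django | hintgen/tools.py | smart_parse
-- ===== SOURCE A (Python) =====
-- def smart_parse(t, sep=","):
-- 	"""Parse a string into a 2d spreadsheet"""
-- 	# First, fix stupid carriage return errors
-- 	t = t.replace("\r\n", "\n").replace("\n\r", "\n").replace("\r", "\n")
--
-- 	# A sheet is made of lines, which are made of tokens
-- 	sheet, line, token = [], [], ""
-- 	inString = False
-- 	for i in range(len(t)):
-- 		if t[i] == '"':
-- 			# Keep track of strings so they can be parsed correctly
-- 			inString = not inString
-- 			continue
--
-- 		if (not inString) and (t[i] == sep):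
-- 			line.append(token)
-- 			token = ""
-- 		elif (not inString) and (t[i] == "\n"):
-- 			if len(token) > 0:
-- 				line.append(token)
-- 				token = ""
-- 			sheet.append(line)
-- 			line = []
-- 		else:
-- 			token += t[i]
--
-- 	# Catch any stragglers
-- 	if len(token) > 0:
-- 		line.append(token)
-- 	if len(line) > 0:
-- 		sheet.append(line)
-- 	return sheet
-- ===== SOURCE B (Python) =====
-- def _split_lines(t):
--     # split into raw line-strings on newlines that occur outside quotes;
--     # quotes are kept in the line content, newlines inside quotes stay literal
--     lines, cur, q = [], "", False
--     for c in t: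
--         if c == '"':
--             q = not q
--             cur += c
--         elif c == "\n" and not q:
--             lines.append(cur)
--             cur = ""
--         else:
--             cur += c
--     lines.append(cur)
--     return lines
--
--
-- def _parse_line(ln, sep):
--     # parse one raw line: strip quotes, split on sep outside quotes
--     # (separators always emit a field, the final token only if non-empty)
--     fields, tok, q = [], "", False
--     for c in ln:
--         if c == '"':
--             q = not q
--         elif c == sep and not q:
--             fields.append(tok)
--             tok = ""
--         else:
--             tok += c
--     if tok:
--         fields.append(tok)
--     return fields
--
--
-- def smart_parse(t, sep=","):
--     """Parse a string into a 2d spreadsheet"""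
--     t = t.replace("\r\n", "\n").replace("\n\r", "\n").replace("\r", "\n")
--     lines = _split_lines(t)
--     body, last = lines[:-1], lines[-1]
--     sheet = [_parse_line(ln, sep) for ln in body]
--     tail = _parse_line(last, sep)
--     if tail:
--         sheet.append(tail)
--     return sheet
-- ===== Notes on version B (the rewrite author's own statement) =====
-- stated objective: alternative
-- what changed: B replaces A's single monolithic character loop (one state machine carrying sheet/line/token/quote at once) by a two-phase decomposition: first split the normalised text into raw line-strings on unquoted newlines, then parse each line independently into fields.
-- outside the precondition, e.g. on smart_parse('a\nb', '\n'): A returns [['a', 'b']], B returns [['a'], ['b']]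
import Mathlib
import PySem

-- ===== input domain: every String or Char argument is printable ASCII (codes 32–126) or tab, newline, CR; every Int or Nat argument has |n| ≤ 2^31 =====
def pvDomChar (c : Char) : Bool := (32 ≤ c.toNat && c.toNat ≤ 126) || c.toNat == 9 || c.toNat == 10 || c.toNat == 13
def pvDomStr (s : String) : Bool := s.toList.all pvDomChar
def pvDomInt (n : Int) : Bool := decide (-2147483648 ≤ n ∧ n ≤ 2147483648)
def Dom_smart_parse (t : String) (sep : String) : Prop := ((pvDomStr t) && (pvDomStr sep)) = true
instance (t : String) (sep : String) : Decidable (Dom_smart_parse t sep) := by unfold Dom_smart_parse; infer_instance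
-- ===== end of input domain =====

-- B re-implements A by a two-phase decomposition (split into raw lines on
-- unquoted newlines, then parse each line); same cost, different structure.

-- ===== PORT A =====
-- one state machine over all characters; state = (sheet, line, token, inString),
-- token carried as List Char (Python's token += c is tok ++ [c])
def pvStepA (sep : String)
    (st : List (List String) × List String × List Char × Bool) (c : Char) :
    List (List String) × List String × List Char × Bool :=
  if c = '"' then (st.1, st.2.1, st.2.2.1, !st.2.2.2)
  else if st.2.2.2 = false ∧ String.mk [c] = sep then
    (st.1, st.2.1 ++ [String.mk st.2.2.1], [], st.2.2.2)
  else if st.2.2.2 = false ∧ c = '\n' then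
    if st.2.2.1.length > 0 then (st.1 ++ [st.2.1 ++ [String.mk st.2.2.1]], [], [], st.2.2.2)
    else (st.1 ++ [st.2.1], [], [], st.2.2.2)
  else (st.1, st.2.1, st.2.2.1 ++ [c], st.2.2.2)

-- the "catch any stragglers" tail of A
def pvAFinish (st : List (List String) × List String × List Char × Bool) :
    List (List String) :=
  let line := if st.2.2.1.length > 0 then st.2.1 ++ [String.mk st.2.2.1] else st.2.1
  if line.length > 0 then st.1 ++ [line] else st.1

def smart_parse (t : String) (sep : String) : List (List String) :=
  let t := PySem.Str.replace (PySem.Str.replace (PySem.Str.replace t "\r\n" "\n") "\n\r" "\n") "\r" "\n"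
  pvAFinish (t.toList.foldl (pvStepA sep) ([], [], [], false))

-- ===== PORT B =====
-- phase 1: split into raw line-strings on newlines occurring outside quotes
def pvSplitLines (cs : List Char) (cur : List Char) (q : Bool) : List (List Char) :=
  match cs with
  | [] => [cur]
  | c :: rest =>
    if c = '"' then pvSplitLines rest (cur ++ [c]) (!q)
    else if c = '\n' ∧ q = false then cur :: pvSplitLines rest [] q
    else pvSplitLines rest (cur ++ [c]) q

-- phase 2: parse one raw line into fields; state = (fields, token, inString)
def pvStepL (sep : String) (st : List String × List Char × Bool) (c : Char) :
    List String × List Char × Bool :=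
  if c = '"' then (st.1, st.2.1, !st.2.2)
  else if String.mk [c] = sep ∧ st.2.2 = false then (st.1 ++ [String.mk st.2.1], [], st.2.2)
  else (st.1, st.2.1 ++ [c], st.2.2)

def pvParseLine (ln : List Char) (sep : String) : List String :=
  let st := ln.foldl (pvStepL sep) ([], [], false)
  if st.2.1 ≠ [] then st.1 ++ [String.mk st.2.1] else st.1

def smart_parse_alt (t : String) (sep : String) : List (List String) :=
  let t := PySem.Str.replace (PySem.Str.replace (PySem.Str.replace t "\r\n" "\n") "\n\r" "\n") "\r" "\n"
  let lines := pvSplitLines t.toList [] false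
  let body := lines.dropLast
  let last := lines.getLastD []
  let sheet := body.map (fun ln => pvParseLine ln sep)
  let tail := pvParseLine last sep
  if tail ≠ [] then sheet ++ [tail] else sheet

-- ===== PRECONDITION & SPEC =====
-- Pre_ excludes sep == "\n", the degenerate corner where the separator collides
-- with the line terminator: A's branch order lets the separator win so lines are
-- never closed (an accident of its branch ordering), while B treats the newline
-- as a line break; on every other input A and B agree.
def Pre_smart_parse (t : String) (sep : String) : Prop := sep ≠ "\n"
instance (t : String) (sep : String) : Decidable (Pre_smart_parse t sep) := by
  unfold Pre_smart_parse; infer_instance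
def pvWitness_smart_parse : String × String := ("a,b\n\"x,y\"\nz", ",")

def Spec_smart_parse (t : String) (sep : String) (out : List (List String)) : Prop := out = smart_parse_alt t sep
instance (t : String) (sep : String) (out : List (List String)) : Decidable (Spec_smart_parse t sep out) := by unfold Spec_smart_parse; infer_instance

-- ===== CLAIM (what is proved, stated in full; the proofs are below) =====
def Claim_equal_smart_parse : Prop := ∀ (t : String) (sep : String), Dom_smart_parse t sep → Pre_smart_parse t sep → Spec_smart_parse t sep (smart_parse t sep)

-- ===== LEMMAS AND PROOFS =====

-- R: A's algorithm written as structural recursion on the remaining characters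
def pvR (sep : String) (line : List String) (tok : List Char) (q : Bool)
    (cs : List Char) : List (List String) :=
  match cs with
  | [] =>
    let line' := if tok.length > 0 then line ++ [String.mk tok] else line
    if line'.length > 0 then [line'] else []
  | c :: cs =>
    if c = '"' then pvR sep line tok (!q) cs
    else if q = false ∧ String.mk [c] = sep then pvR sep (line ++ [String.mk tok]) [] q cs
    else if q = false ∧ c = '\n' then
      (if tok.length > 0 then line ++ [String.mk tok] else line) :: pvR sep [] [] q cs
    else pvR sep line (tok ++ [c]) q cs

-- A's fold-then-flush equals sheet ++ R
theorem pvA_eq_R (sep : String) (cs : List Char) :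
    ∀ (sheet : List (List String)) (line : List String) (tok : List Char) (q : Bool),
    pvAFinish (cs.foldl (pvStepA sep) (sheet, line, tok, q))
      = sheet ++ pvR sep line tok q cs := by
  induction cs with
  | nil =>
    intro sheet line tok q
    simp only [List.foldl_nil, pvR, pvAFinish]
    split_ifs with h1 h2 h2 <;> simp_all
  | cons c cs ih =>
    intro sheet line tok q
    simp only [List.foldl_cons, pvStepA, pvR]
    split_ifs with h1 h2 h3 h4 <;> simp [ih, List.append_assoc]

-- pvSplitLines is never empty
theorem pvSplitLines_ne_nil (cs : List Char) :
    ∀ (cur : List Char) (q : Bool), pvSplitLines cs cur q ≠ [] := by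
  induction cs with
  | nil => intro cur q; simp [pvSplitLines]
  | cons c cs ih => intro cur q; simp only [pvSplitLines]; split_ifs <;> simp [ih]

-- B's assembly of a list of raw lines (= the tail of smart_parse_alt)
def pvFinish (sep : String) (lines : List (List Char)) : List (List String) :=
  let sheet := lines.dropLast.map (fun ln => pvParseLine ln sep)
  let tail := pvParseLine (lines.getLastD []) sep
  if tail ≠ [] then sheet ++ [tail] else sheet

theorem pvFinish_cons (sep : String) (l : List Char) (ls : List (List Char)) (h : ls ≠ []) :
    pvFinish sep (l :: ls) = pvParseLine l sep :: pvFinish sep ls := by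
  have h1 : (l :: ls).getLast? = ls.getLast? := by
    cases ls with
    | nil => exact absurd rfl h
    | cons a as => exact List.getLast?_cons_cons ..
  by_cases ht : pvParseLine (ls.getLastD []) sep = [] <;>
    simp_all [pvFinish, List.dropLast_cons_of_ne_nil h, List.getLastD_eq_getLast?]

-- core lemma: R, started from the parse state of the consumed prefix `cur`,
-- equals B's split-then-parse of the remaining characters
theorem pvR_eq_split (sep : String) (hsep : sep ≠ "\n") (cs : List Char) :
    ∀ (cur : List Char) (fields : List String) (tok : List Char) (q : Bool),
    cur.foldl (pvStepL sep) ([], [], false) = (fields, tok, q) →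
    pvR sep fields tok q cs = pvFinish sep (pvSplitLines cs cur q) := by
  induction cs with
  | nil =>
    intro cur fields tok q h
    simp only [pvR, pvSplitLines, pvFinish, List.dropLast, List.getLastD, List.map_nil,
      pvParseLine, h]
    by_cases ht : tok = [] <;>
      simp [ht, List.length_pos_iff] <;> split_ifs <;> simp_all [List.length_pos_iff]
  | cons c cs ih =>
    intro cur fields tok q h
    simp only [pvR, pvSplitLines]
    by_cases h1 : c = '"'
    · subst h1
      rw [if_pos rfl, if_pos rfl]
      exact ih (cur ++ ['"']) fields tok (!q) (by
        rw [List.foldl_append, h, List.foldl_cons, List.foldl_nil, pvStepL, if_pos rfl])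
    · by_cases h2 : q = false ∧ String.mk [c] = sep
      · have hcn : c ≠ '\n' := fun hc => hsep (by rw [← h2.2, hc]; rfl)
        rw [if_neg h1, if_pos h2, if_neg h1,
          if_neg (by intro hh; exact hcn hh.1)]
        exact ih (cur ++ [c]) (fields ++ [String.mk tok]) [] q (by
          rw [List.foldl_append, h, List.foldl_cons, List.foldl_nil, pvStepL,
            if_neg h1, if_pos ⟨h2.2, h2.1⟩])
      · by_cases h3 : q = false ∧ c = '\n'
        · have hq : q = false := h3.1
          subst hq
          rw [if_neg h1, if_neg h2, if_pos h3]
          have hsplit : (if c = '\n' ∧ false = false then cur :: pvSplitLines cs [] false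
              else pvSplitLines cs (cur ++ [c]) false) = cur :: pvSplitLines cs [] false :=
            if_pos ⟨h3.2, rfl⟩
          rw [if_neg h1, hsplit]
          rw [pvFinish_cons sep cur _ (pvSplitLines_ne_nil cs [] false)]
          have hline : pvParseLine cur sep
              = if tok.length > 0 then fields ++ [String.mk tok] else fields := by
            simp only [pvParseLine, h]
            by_cases ht : tok = [] <;> simp [ht, List.length_pos_iff]
          rw [hline]
          congr 1
          exact ih [] [] [] false rfl
        · have hns : ¬ (String.mk [c] = sep ∧ q = false) := fun hh => h2 ⟨hh.2, hh.1⟩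
          have hnn : ¬ (c = '\n' ∧ q = false) := fun hh => h3 ⟨hh.2, hh.1⟩
          rw [if_neg h1, if_neg h2, if_neg h3, if_neg h1, if_neg hnn]
          exact ih (cur ++ [c]) fields (tok ++ [c]) q (by
            rw [List.foldl_append, h, List.foldl_cons, List.foldl_nil, pvStepL,
              if_neg h1, if_neg hns])

-- ===== VERDICT (by name: the statement is the Claim_ definition above) =====
theorem smart_parse_spec : Claim_equal_smart_parse := by
  intro t sep _ hpre
  unfold Spec_smart_parse smart_parse smart_parse_alt
  rw [pvA_eq_R sep _ [] [] [] false, List.nil_append,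
    pvR_eq_split sep hpre _ [] [] [] false rfl]
  rfl
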